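-- pv_equiv track=rewrite | github.com/zbaragzay/Programming-coursework | png.py | unfilter_4
-- ===== SOURCE A (Python) =====
-- def unfilter_4(row_data, prev_row, bpp):
--     """Unfilter for filter type 4 (Paeth)."""
--     result = []
--     for i in range(len(row_data)):
--         left = result[i - bpp] if i >= bpp else 0
--         above = prev_row[i] if prev_row else 0
--         upper_left = prev_row[i - bpp] if i >= bpp and prev_row else 0
--
--         p = left + above - upper_left
--         pa = abs(p - left)
--         pb = abs(p - above)
--         pc = abs(p - upper_left)
--         if pa <= pb and pa <= pc:
--             predictor = left
--         elif pb <= pc: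
--             predictor = above
--         else:
--             predictor = upper_left
--
--         result.append((row_data[i] + predictor) % 256)
--     return result
-- ===== SOURCE B (Python) =====
-- def unfilter_4(row_data, prev_row, bpp):
--     """Unfilter for filter type 4 (Paeth), one pass per channel with running scalars."""
--     n = len(row_data)
--     result = [0] * n
--     for c in range(min(bpp, n)):  # channels >= n have no positions
--         left = 0
--         upper_left = 0
--         for i in range(c, n, bpp):
--             above = prev_row[i] if prev_row else 0
--             p = left + above - upper_left
--             pa = abs(p - left)
--             pb = abs(p - above)
--             pc = abs(p - upper_left)
--             if pa <= pb and pa <= pc: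
--                 predictor = left
--             elif pb <= pc:
--                 predictor = above
--             else:
--                 predictor = upper_left
--             result[i] = (row_data[i] + predictor) % 256
--             left = result[i]
--             upper_left = above
--     return result
-- ===== Notes on version B (the rewrite author's own statement) =====
-- stated objective: alternative
-- what changed: Replaces A's single flat pass that appends to result and re-indexes it backwards (result[i-bpp]) with per-channel passes (c in range(min(bpp, n))) over a preallocated buffer, carrying left and upper_left as running scalars instead of list lookups.
import Mathlib
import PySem

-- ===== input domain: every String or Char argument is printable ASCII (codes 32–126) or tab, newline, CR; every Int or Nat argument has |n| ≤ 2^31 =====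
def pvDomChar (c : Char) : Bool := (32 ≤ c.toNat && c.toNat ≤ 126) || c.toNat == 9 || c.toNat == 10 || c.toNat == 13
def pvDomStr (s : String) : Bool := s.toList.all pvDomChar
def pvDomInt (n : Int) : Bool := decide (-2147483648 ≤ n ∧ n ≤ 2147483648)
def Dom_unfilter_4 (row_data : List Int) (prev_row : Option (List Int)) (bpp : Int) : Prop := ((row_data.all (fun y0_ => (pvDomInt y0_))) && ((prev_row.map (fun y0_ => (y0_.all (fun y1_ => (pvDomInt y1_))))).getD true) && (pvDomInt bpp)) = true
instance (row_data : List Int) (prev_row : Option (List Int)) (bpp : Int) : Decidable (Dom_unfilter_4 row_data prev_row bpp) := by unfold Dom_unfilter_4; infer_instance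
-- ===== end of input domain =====

-- B replaces A's flat appending pass (which re-indexes result backwards) by per-channel
-- passes over a preallocated buffer carrying left/upper_left as running scalars (alternative decomposition, same cost).


-- ===== PORT A =====
-- literal transliteration of A: one pass i = 0..len-1, appending to result, left read back
-- from result[i-bpp]. Python's `if prev_row` truthiness (None and [] falsy) is modeled by
-- `prev_row.getD []` being nonempty; indexing via pyGetD (in range under Pre_, where Python does not raise).
def unfilter_4 (row_data : List Int) (prev_row : Option (List Int)) (bpp : Int) : List Int :=
  (PySem.List.pyRange 0 (row_data.length : Int) 1).foldl (fun result i =>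
    let left : Int := if bpp ≤ i then PySem.List.pyGetD result (i - bpp) 0 else 0
    let above : Int := if prev_row.getD [] ≠ [] then PySem.List.pyGetD (prev_row.getD []) i 0 else 0
    let upper_left : Int := if bpp ≤ i ∧ prev_row.getD [] ≠ [] then PySem.List.pyGetD (prev_row.getD []) (i - bpp) 0 else 0
    let p := left + above - upper_left
    let pa := |p - left|
    let pb := |p - above|
    let pc := |p - upper_left|
    let predictor := if pa ≤ pb ∧ pa ≤ pc then left else if pb ≤ pc then above else upper_left
    result ++ [PySem.Int.mod (PySem.List.pyGetD row_data i 0 + predictor) 256]) []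

-- ===== PORT B =====
-- literal transliteration of B: preallocated buffer, outer loop over channels c in range(min(bpp, n)),
-- inner loop over i in range(c, n, bpp) carrying (result, left, upper_left); same truthiness model.
def unfilter_4_alt (row_data : List Int) (prev_row : Option (List Int)) (bpp : Int) : List Int :=
  let n : Int := row_data.length
  (PySem.List.pyRange 0 (min bpp n) 1).foldl (fun result c =>
    ((PySem.List.pyRange c n bpp).foldl (fun (st : List Int × Int × Int) i =>
      let above : Int := if prev_row.getD [] ≠ [] then PySem.List.pyGetD (prev_row.getD []) i 0 else 0
      let p := st.2.1 + above - st.2.2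
      let pa := |p - st.2.1|
      let pb := |p - above|
      let pc := |p - st.2.2|
      let predictor := if pa ≤ pb ∧ pa ≤ pc then st.2.1 else if pb ≤ pc then above else st.2.2
      let v := PySem.Int.mod (PySem.List.pyGetD row_data i 0 + predictor) 256
      (PySem.List.pySetD st.1 i v, v, above)) (result, (0 : Int), (0 : Int))).1)
    (List.replicate row_data.length (0 : Int))

-- ===== PRECONDITION & SPEC =====
-- Pre_ excludes exactly the inputs where Python A raises IndexError: bpp ≤ 0 with a nonempty row
-- (result[i-bpp] out of range), and a nonempty prev_row shorter than row_data (prev_row[i] out of range).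
def Pre_unfilter_4 (row_data : List Int) (prev_row : Option (List Int)) (bpp : Int) : Prop :=
  row_data = [] ∨ (1 ≤ bpp ∧ (prev_row.getD [] = [] ∨ row_data.length ≤ (prev_row.getD []).length))
instance (row_data : List Int) (prev_row : Option (List Int)) (bpp : Int) : Decidable (Pre_unfilter_4 row_data prev_row bpp) := by unfold Pre_unfilter_4; infer_instance
def pvWitness_unfilter_4 : List Int × Option (List Int) × Int := ([10, 20, 30, 40], some [1, 2, 3, 4], 2)

def Spec_unfilter_4 (row_data : List Int) (prev_row : Option (List Int)) (bpp : Int) (out : List Int) : Prop := out = unfilter_4_alt row_data prev_row bpp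
instance (row_data : List Int) (prev_row : Option (List Int)) (bpp : Int) (out : List Int) : Decidable (Spec_unfilter_4 row_data prev_row bpp out) := by unfold Spec_unfilter_4; infer_instance

-- ===== CLAIM (what is proved, stated in full; the proofs are below) =====
def Claim_equal_unfilter_4 : Prop := ∀ (row_data : List Int) (prev_row : Option (List Int)) (bpp : Int), Dom_unfilter_4 row_data prev_row bpp → Pre_unfilter_4 row_data prev_row bpp → Spec_unfilter_4 row_data prev_row bpp (unfilter_4 row_data prev_row bpp)

-- ===== LEMMAS AND PROOFS =====

-- `prev_row[i] if prev_row else 0` as a function (proof helper)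
def pvPrevAt (prev : Option (List Int)) (j : Int) : Int :=
  if prev.getD [] ≠ [] then PySem.List.pyGetD (prev.getD []) j 0 else 0

-- the Paeth predictor selection
def pvCore (left above ul : Int) : Int :=
  let p := left + above - ul
  let pa := |p - left|
  let pb := |p - above|
  let pc := |p - ul|
  if pa ≤ pb ∧ pa ≤ pc then left else if pb ≤ pc then above else ul

-- the value written at position i, given the reconstructed left neighbour
def pvVal (rd : List Int) (prev : Option (List Int)) (bpp : Int) (left : Int) (i : Int) : Int :=
  PySem.Int.mod (PySem.List.pyGetD rd i 0 +
    pvCore left (pvPrevAt prev i) (if bpp ≤ i then pvPrevAt prev (i - bpp) else 0)) 256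

-- fuel-indexed reconstruction of the output value at position i
def pvS (rd : List Int) (prev : Option (List Int)) (bpp : Int) : Nat → Nat → Int
  | 0, _ => 0
  | f+1, i =>
      pvVal rd prev bpp (if bpp ≤ (i:Int) then pvS rd prev bpp f (i - bpp.toNat) else 0) (i:Int)

def pvSV (rd : List Int) (prev : Option (List Int)) (bpp : Int) (i : Nat) : Int :=
  pvS rd prev bpp (i+1) i

lemma pvS_irrel (rd : List Int) (prev : Option (List Int)) (bpp : Int) (hb : 1 ≤ bpp) :
    ∀ f g i, i < f → i < g → pvS rd prev bpp f i = pvS rd prev bpp g i := by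
  intro f
  induction f with
  | zero => intro g i h _; exact absurd h (Nat.not_lt_zero i)
  | succ f ih =>
    intro g i hf hg
    cases g with
    | zero => exact absurd hg (Nat.not_lt_zero i)
    | succ g' =>
      simp only [pvS]
      by_cases hbi : bpp ≤ (i:Int)
      · rw [if_pos hbi, if_pos hbi, ih g' (i - bpp.toNat) (by omega) (by omega)]
      · rw [if_neg hbi, if_neg hbi]

-- A's loop body as a named function (definitionally the lambda in the port)
def pvStepA (rd : List Int) (prev : Option (List Int)) (bpp : Int) (result : List Int) (i : Int) : List Int :=
  let left : Int := if bpp ≤ i then PySem.List.pyGetD result (i - bpp) 0 else 0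
  let above : Int := if prev.getD [] ≠ [] then PySem.List.pyGetD (prev.getD []) i 0 else 0
  let upper_left : Int := if bpp ≤ i ∧ prev.getD [] ≠ [] then PySem.List.pyGetD (prev.getD []) (i - bpp) 0 else 0
  let p := left + above - upper_left
  let pa := |p - left|
  let pb := |p - above|
  let pc := |p - upper_left|
  let predictor := if pa ≤ pb ∧ pa ≤ pc then left else if pb ≤ pc then above else upper_left
  result ++ [PySem.Int.mod (PySem.List.pyGetD rd i 0 + predictor) 256]

lemma pvStepA_spec (rd : List Int) (prev : Option (List Int)) (bpp : Int) (hb : 1 ≤ bpp) (t : Nat) :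
    pvStepA rd prev bpp ((List.range t).map (pvSV rd prev bpp)) (t:Int)
      = (List.range t).map (pvSV rd prev bpp) ++ [pvSV rd prev bpp t] := by
  have hleft0 : bpp ≤ (t:Int) →
      PySem.List.pyGetD ((List.range t).map (pvSV rd prev bpp)) ((t:Int) - bpp) 0
        = pvS rd prev bpp t (t - bpp.toNat) := by
    intro h
    rw [PySem.List.pyGetD_eq_getElem _ _ (by omega) (by simp; omega)]
    simp only [List.getElem_map, List.getElem_range]
    have he : ((t:Int) - bpp).toNat = t - bpp.toNat := by omega
    rw [he]
    exact pvS_irrel rd prev bpp hb _ _ _ (by omega) (by omega)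
  by_cases h1 : bpp ≤ (t:Int)
  · simp [pvStepA, pvSV, pvS, pvVal, pvCore, pvPrevAt, h1, hleft0 h1]
  · simp [pvStepA, pvSV, pvS, pvVal, pvCore, pvPrevAt, h1]

lemma pvAfold (rd : List Int) (prev : Option (List Int)) (bpp : Int) (hb : 1 ≤ bpp) :
    ∀ t, (List.range t).foldl (fun r (k : Nat) => pvStepA rd prev bpp r (k:Int)) []
      = (List.range t).map (pvSV rd prev bpp) := by
  intro t
  induction t with
  | zero => rfl
  | succ t ih =>
    rw [List.range_succ, List.foldl_append, List.map_append, ih]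
    simp only [List.foldl_cons, List.foldl_nil]
    exact pvStepA_spec rd prev bpp hb t

-- B's inner-loop body as a named function (definitionally the lambda in the port)
def pvStepB (rd : List Int) (prev : Option (List Int)) (st : List Int × Int × Int) (i : Int) :
    List Int × Int × Int :=
  let above : Int := if prev.getD [] ≠ [] then PySem.List.pyGetD (prev.getD []) i 0 else 0
  let p := st.2.1 + above - st.2.2
  let pa := |p - st.2.1|
  let pb := |p - above|
  let pc := |p - st.2.2|
  let predictor := if pa ≤ pb ∧ pa ≤ pc then st.2.1 else if pb ≤ pc then above else st.2.2
  let v := PySem.Int.mod (PySem.List.pyGetD rd i 0 + predictor) 256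
  (PySem.List.pySetD st.1 i v, v, above)

-- B's outer-loop body
def pvOuterB (rd : List Int) (prev : Option (List Int)) (bpp : Int) (result : List Int) (c : Int) :
    List Int :=
  ((PySem.List.pyRange c (rd.length : Int) bpp).foldl (pvStepB rd prev) (result, (0:Int), (0:Int))).1

lemma pvStepB_spec (rd : List Int) (prev : Option (List Int)) (bpp : Int) (hb : 1 ≤ bpp)
    (res : List Int) (i : Nat) :
    pvStepB rd prev (res,
        (if bpp ≤ (i:Int) then pvSV rd prev bpp (i - bpp.toNat) else 0),
        (if bpp ≤ (i:Int) then pvPrevAt prev ((i:Int) - bpp) else 0)) (i:Int)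
      = (PySem.List.pySetD res (i:Int) (pvSV rd prev bpp i), pvSV rd prev bpp i,
          pvPrevAt prev (i:Int)) := by
  by_cases h1 : bpp ≤ (i:Int)
  · have hL0 : pvSV rd prev bpp (i - bpp.toNat) = pvS rd prev bpp i (i - bpp.toNat) :=
      pvS_irrel rd prev bpp hb _ _ _ (by omega) (by omega)
    rw [hL0]
    simp [pvStepB, pvSV, pvS, pvVal, pvCore, pvPrevAt, h1]
  · simp [pvStepB, pvSV, pvS, pvVal, pvCore, pvPrevAt, h1]

-- the buffer state: channels < c fully reconstructed, channel c reconstructed below i, rest still 0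
def pvMix (rd : List Int) (prev : Option (List Int)) (bpp : Int) (c i : Nat) : List Int :=
  (List.range rd.length).map (fun j =>
    if j % bpp.toNat < c ∨ (j % bpp.toNat = c ∧ j < i) then pvSV rd prev bpp j else 0)

lemma pvMix_zero (rd : List Int) (prev : Option (List Int)) (bpp : Int) (c : Nat) :
    pvMix rd prev bpp c 0 = pvMix rd prev bpp c c := by
  unfold pvMix
  apply List.map_congr_left
  intro j _
  refine if_congr ?_ rfl rfl
  have hml := Nat.mod_le j bpp.toNat
  generalize j % bpp.toNat = m at *
  omega

lemma pvModBetween (B m i : Nat) (h1 : m % B = i % B) (h2 : i ≤ m) (h3 : m < i + B) : m = i := by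
  have hd : B ∣ m - i := (Nat.modEq_iff_dvd' h2).mp h1.symm
  have := Nat.eq_zero_of_dvd_of_lt hd (by omega)
  omega

lemma pvRange_len (c n bpp : Int) (hb : 0 < bpp) (hc : 0 ≤ c) (k : Nat) :
    k < (PySem.List.pyRange c n bpp).length ↔ c + bpp * k < n := by
  rw [PySem.List.pyRange_of_pos c n hb]
  simp only [List.length_map, List.length_range]
  by_cases h : c < n
  · rw [if_pos h, Int.lt_toNat]
    constructor
    · intro hk
      have h2 : (k:Int) + 1 ≤ (n - c + bpp - 1) / bpp := by omega
      have h3 := (Int.le_ediv_iff_mul_le hb).mp h2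
      nlinarith
    · intro hk
      have h3 : ((k:Int) + 1) * bpp ≤ n - c + bpp - 1 := by nlinarith
      have h4 := (Int.le_ediv_iff_mul_le hb).mpr h3
      omega
  · rw [if_neg h]
    simp only [Nat.not_lt_zero, false_iff, not_lt]
    have : (0:Int) ≤ bpp * k := by positivity
    omega

lemma pvRange_get (c n bpp : Int) (hb : 0 < bpp) (k : Nat)
    (hk : k < (PySem.List.pyRange c n bpp).length) :
    (PySem.List.pyRange c n bpp)[k] = c + bpp * k := by
  simp only [PySem.List.pyRange_of_pos c n hb, List.getElem_map, List.getElem_range]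

lemma pvMix_set (rd : List Int) (prev : Option (List Int)) (bpp : Int) (hb : 1 ≤ bpp)
    (c i : Nat) (hmod : i % bpp.toNat = c) (hin : i < rd.length) :
    PySem.List.pySetD (pvMix rd prev bpp c i) (i:Int) (pvSV rd prev bpp i)
      = pvMix rd prev bpp c (i + bpp.toNat) := by
  rw [PySem.List.pySetD_of_nonneg _ _ (Int.natCast_nonneg i)]
  simp only [Int.toNat_natCast]
  apply List.ext_getElem
  · simp [pvMix]
  · intro m hm1 hm2
    rw [List.getElem_set]
    by_cases he : i = m
    · subst he
      rw [if_pos rfl]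
      simp only [pvMix, List.getElem_map, List.getElem_range]
      rw [if_pos (Or.inr ⟨hmod, by omega⟩)]
    · rw [if_neg he]
      simp only [pvMix, List.getElem_map, List.getElem_range]
      refine if_congr ?_ rfl rfl
      constructor
      · rintro (h | ⟨h1, h2⟩)
        · exact Or.inl h
        · exact Or.inr ⟨h1, by omega⟩
      · rintro (h | ⟨h1, h2⟩)
        · exact Or.inl h
        · refine Or.inr ⟨h1, ?_⟩
          by_contra hle
          push_neg at hle
          exact he (pvModBetween bpp.toNat m i (h1.trans hmod.symm) hle h2).symm

lemma pvMix_full (rd : List Int) (prev : Option (List Int)) (bpp : Int) (hb : 1 ≤ bpp)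
    (c : Nat) (hc : c < bpp.toNat) :
    pvMix rd prev bpp c (c + bpp.toNat * (PySem.List.pyRange (c:Int) (rd.length:Int) bpp).length)
      = pvMix rd prev bpp (c+1) 0 := by
  unfold pvMix
  apply List.map_congr_left
  intro j hj
  have hjn : j < rd.length := List.mem_range.mp hj
  refine if_congr ?_ rfl rfl
  have hkey : j % bpp.toNat = c →
      j < c + bpp.toNat * (PySem.List.pyRange (c:Int) (rd.length:Int) bpp).length := by
    intro hjc
    have hdm := Nat.div_add_mod j bpp.toNat
    have hlt : j / bpp.toNat < (PySem.List.pyRange (c:Int) (rd.length:Int) bpp).length := by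
      rw [pvRange_len (c:Int) (rd.length:Int) bpp (by omega) (Int.natCast_nonneg c) (j / bpp.toNat)]
      have hnat : c + bpp.toNat * (j / bpp.toNat) < rd.length := by omega
      have hbB : ((bpp.toNat : Int)) = bpp := by omega
      rw [← hbB]
      exact_mod_cast hnat
    have h2 : bpp.toNat * (j / bpp.toNat)
        < bpp.toNat * (PySem.List.pyRange (c:Int) (rd.length:Int) bpp).length :=
      mul_lt_mul_of_pos_left hlt (by omega)
    omega
  constructor
  · rintro (h | ⟨h1, _⟩)
    · exact Or.inl (by omega)
    · exact Or.inl (by omega)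
  · rintro (h | ⟨_, h2⟩)
    · by_cases hc2 : j % bpp.toNat < c
      · exact Or.inl hc2
      · have hec : j % bpp.toNat = c := by omega
        exact Or.inr ⟨hec, hkey hec⟩
    · exact absurd h2 (Nat.not_lt_zero j)

lemma pvInner (rd : List Int) (prev : Option (List Int)) (bpp : Int) (hb : 1 ≤ bpp)
    (c : Nat) (hc : c < bpp.toNat) :
    ∀ t, t ≤ (PySem.List.pyRange (c:Int) (rd.length:Int) bpp).length →
      ((PySem.List.pyRange (c:Int) (rd.length:Int) bpp).take t).foldl (pvStepB rd prev)
          (pvMix rd prev bpp c 0, 0, 0)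
        = (pvMix rd prev bpp c (c + bpp.toNat * t),
           if t = 0 then 0 else pvSV rd prev bpp (c + bpp.toNat * (t - 1)),
           if t = 0 then 0 else pvPrevAt prev ((c + bpp.toNat * (t - 1) : Nat) : Int)) := by
  intro t
  induction t with
  | zero =>
    intro _
    simp only [List.take_zero, List.foldl_nil, Nat.mul_zero, Nat.add_zero]
    rw [pvMix_zero]
    simp
  | succ t ih =>
    intro ht1
    have ht : t < (PySem.List.pyRange (c:Int) (rd.length:Int) bpp).length := by omega
    have hbB : ((bpp.toNat : Int)) = bpp := by omega
    rw [List.take_add_one, List.getElem?_eq_getElem ht]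
    simp only [Option.toList_some]
    rw [List.foldl_append, ih (by omega)]
    simp only [List.foldl_cons, List.foldl_nil]
    have hgetv : (PySem.List.pyRange (c:Int) (rd.length:Int) bpp)[t]
        = ((c + bpp.toNat * t : Nat) : Int) := by
      rw [pvRange_get (c:Int) (rd.length:Int) bpp (by omega) t ht]
      push_cast [hbB]
      ring
    rw [hgetv]
    have hin : c + bpp.toNat * t < rd.length := by
      have h5 := (pvRange_len (c:Int) (rd.length:Int) bpp (by omega) (Int.natCast_nonneg c) t).mp ht
      rw [← hbB] at h5
      exact_mod_cast h5
    have hmod : (c + bpp.toNat * t) % bpp.toNat = c := by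
      rw [Nat.add_mul_mod_self_left]
      exact Nat.mod_eq_of_lt hc
    have hLU1 : (if t = 0 then 0 else pvSV rd prev bpp (c + bpp.toNat * (t - 1)))
        = (if bpp ≤ ((c + bpp.toNat * t : Nat) : Int) then
            pvSV rd prev bpp ((c + bpp.toNat * t) - bpp.toNat) else 0) := by
      cases t with
      | zero =>
        rw [if_pos rfl, if_neg (by omega)]
      | succ s =>
        have hle : bpp ≤ ((c + bpp.toNat * (s+1) : Nat) : Int) := by
          rw [Nat.mul_succ]; omega
        rw [if_neg (Nat.succ_ne_zero s), if_pos hle]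
        congr 1
        simp only [Nat.add_sub_cancel]
        rw [Nat.mul_succ]
        omega
    have hLU2 : (if t = 0 then 0 else pvPrevAt prev ((c + bpp.toNat * (t - 1) : Nat) : Int))
        = (if bpp ≤ ((c + bpp.toNat * t : Nat) : Int) then
            pvPrevAt prev (((c + bpp.toNat * t : Nat) : Int) - bpp) else 0) := by
      cases t with
      | zero =>
        rw [if_pos rfl, if_neg (by omega)]
      | succ s =>
        have hle : bpp ≤ ((c + bpp.toNat * (s+1) : Nat) : Int) := by
          rw [Nat.mul_succ]; omega
        rw [if_neg (Nat.succ_ne_zero s), if_pos hle]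
        congr 1
        simp only [Nat.add_sub_cancel]
        rw [Nat.mul_succ]
        omega
    rw [hLU1, hLU2, pvStepB_spec rd prev bpp hb _ (c + bpp.toNat * t),
      pvMix_set rd prev bpp hb c (c + bpp.toNat * t) hmod hin]
    refine Prod.ext ?_ (Prod.ext ?_ ?_)
    · show pvMix rd prev bpp c (c + bpp.toNat * t + bpp.toNat)
        = pvMix rd prev bpp c (c + bpp.toNat * (t + 1))
      congr 1
      rw [Nat.mul_succ]
      omega
    · show pvSV rd prev bpp (c + bpp.toNat * t)
        = if t + 1 = 0 then 0 else pvSV rd prev bpp (c + bpp.toNat * (t + 1 - 1))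
      rw [if_neg (Nat.succ_ne_zero t), Nat.add_sub_cancel]
    · show pvPrevAt prev ((c + bpp.toNat * t : Nat) : Int)
        = if t + 1 = 0 then 0 else pvPrevAt prev ((c + bpp.toNat * (t + 1 - 1) : Nat) : Int)
      rw [if_neg (Nat.succ_ne_zero t), Nat.add_sub_cancel]

lemma pvOuter (rd : List Int) (prev : Option (List Int)) (bpp : Int) (hb : 1 ≤ bpp) :
    ∀ c, c ≤ bpp.toNat →
      (List.range c).foldl (fun r (k : Nat) => pvOuterB rd prev bpp r (k:Int))
          (List.replicate rd.length (0:Int))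
        = pvMix rd prev bpp c 0 := by
  intro c
  induction c with
  | zero =>
    intro _
    simp only [List.range_zero, List.foldl_nil]
    unfold pvMix
    have hz : ∀ j ∈ List.range rd.length,
        (if j % bpp.toNat < 0 ∨ (j % bpp.toNat = 0 ∧ j < 0) then pvSV rd prev bpp j else 0)
          = (0:Int) := fun j _ => if_neg (by omega)
    rw [List.map_congr_left hz, List.map_const', List.length_range]
  | succ c ihc =>
    intro hc1
    rw [List.range_succ, List.foldl_append, ihc (by omega)]
    simp only [List.foldl_cons, List.foldl_nil]
    unfold pvOuterB
    have hfull := pvInner rd prev bpp hb c (by omega)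
      (PySem.List.pyRange (c:Int) (rd.length:Int) bpp).length (le_refl _)
    rw [List.take_length] at hfull
    rw [hfull]
    exact pvMix_full rd prev bpp hb c (by omega)

lemma pvMain (rd : List Int) (prev : Option (List Int)) (bpp : Int) (hb : 1 ≤ bpp) :
    unfilter_4 rd prev bpp = unfilter_4_alt rd prev bpp := by
  have hA : unfilter_4 rd prev bpp = (List.range rd.length).map (pvSV rd prev bpp) := by
    rw [show unfilter_4 rd prev bpp
        = (PySem.List.pyRange 0 (rd.length:Int) 1).foldl (pvStepA rd prev bpp) [] from rfl]
    rw [PySem.List.pyRange_zero, Int.toNat_natCast, List.foldl_map]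
    exact pvAfold rd prev bpp hb rd.length
  have hB : unfilter_4_alt rd prev bpp = pvMix rd prev bpp ((min bpp (rd.length:Int)).toNat) 0 := by
    rw [show unfilter_4_alt rd prev bpp
        = (PySem.List.pyRange 0 (min bpp (rd.length:Int)) 1).foldl (pvOuterB rd prev bpp)
            (List.replicate rd.length (0:Int)) from rfl]
    rw [PySem.List.pyRange_zero, List.foldl_map]
    exact pvOuter rd prev bpp hb ((min bpp (rd.length:Int)).toNat) (by omega)
  rw [hA, hB]
  unfold pvMix
  apply List.map_congr_left
  intro j hj
  have hjn := List.mem_range.mp hj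
  have h1 : j % bpp.toNat < bpp.toNat := Nat.mod_lt j (by omega)
  have h2 : j % bpp.toNat ≤ j := Nat.mod_le j bpp.toNat
  rw [if_pos (Or.inl (by omega))]

-- ===== VERDICT (by name: the statement is the Claim_ definition above) =====
theorem unfilter_4_spec : Claim_equal_unfilter_4 := by
  unfold Claim_equal_unfilter_4
  intro rd prev bpp _ hpre
  unfold Spec_unfilter_4
  by_cases hb : 1 ≤ bpp
  · exact pvMain rd prev bpp hb
  · rcases hpre with hnil | ⟨hb1, _⟩
    · subst hnil
      simp [unfilter_4, unfilter_4_alt]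
    · exact absurd hb1 hb
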